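-- pv_equiv track=rewrite | github.com/windjacker/Project-Euler | functions.py | skalarProd
-- ===== SOURCE A (Python) =====
-- def skalarProd(a, b):
--     """
--     """
--     if type(a) != type([]):
--         a = [a]
--     if type(b) != type([]):
--         b = [b]
--
--     r = []
--
--     if (len(a) == len(b)):
--         for i in range(len(a)):
--             r.append(a[i]*b[i])
--
--     elif (len(a)==1):
--         for i in b:
--             r.append(a[0]*i)
--
--     elif (len(b)==1):
--         for i in a:
--             r.append(i*b[0])
--
--     return r
-- ===== SOURCE B (Python) =====
-- def skalarProd(a, b):
--     if type(a) != type([]):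
--         a = [a]
--     if type(b) != type([]):
--         b = [b]
--     la, lb = len(a), len(b)
--     if la == 0 or lb == 0 or (la != lb and la != 1 and lb != 1):
--         return []
--     return [a[i % la] * b[i % lb] for i in range(max(la, lb))]
-- ===== Notes on version B (the rewrite author's own statement) =====
-- stated objective: alternative
-- what changed: B replaces A's three case-specific loops with a single compatibility test and one comprehension over range(max(len(a),len(b))) that broadcasts by cyclic (modular) indexing a[i%la]*b[i%lb].
import Mathlib
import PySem

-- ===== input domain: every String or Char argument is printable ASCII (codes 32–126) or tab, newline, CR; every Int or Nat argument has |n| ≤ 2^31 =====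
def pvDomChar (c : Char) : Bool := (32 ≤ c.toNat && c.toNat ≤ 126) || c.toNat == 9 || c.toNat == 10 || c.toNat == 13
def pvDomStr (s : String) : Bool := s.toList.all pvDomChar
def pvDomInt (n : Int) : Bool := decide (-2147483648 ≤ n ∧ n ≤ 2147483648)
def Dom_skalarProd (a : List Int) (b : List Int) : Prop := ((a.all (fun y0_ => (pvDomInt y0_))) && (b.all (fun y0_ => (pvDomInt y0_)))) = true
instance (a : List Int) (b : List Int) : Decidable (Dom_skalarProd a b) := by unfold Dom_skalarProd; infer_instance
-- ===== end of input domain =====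

-- B broadcasts by cyclic (modular) indexing in one comprehension over range(max lengths), replacing A's three case loops (alternative decomposition; same cost).


-- ===== PORT A =====
-- Under the type convention a and b are always lists, so A's scalar-wrapping branches never fire.
def skalarProd (a : List Int) (b : List Int) : List Int :=
  if a.length = b.length then
    (PySem.List.pyRange 0 (a.length : Int) 1).foldl
      (fun r i => r ++ [PySem.List.pyGetD a i 0 * PySem.List.pyGetD b i 0]) []
  else if a.length = 1 then
    b.foldl (fun r i => r ++ [PySem.List.pyGetD a 0 0 * i]) []
  else if b.length = 1 then
    a.foldl (fun r i => r ++ [i * PySem.List.pyGetD b 0 0]) []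
  else []

-- ===== PORT B =====
-- one compatibility guard, then a single comprehension with cyclic (modular) indexing
-- (i % la uses Nat %, exact for Python's % here: both operands are nonnegative and la, lb > 0 in this branch)
def skalarProd_alt (a : List Int) (b : List Int) : List Int :=
  let la := a.length
  let lb := b.length
  if la = 0 ∨ lb = 0 ∨ (la ≠ lb ∧ la ≠ 1 ∧ lb ≠ 1) then []
  else (List.range (max la lb)).map (fun i => a.getD (i % la) 0 * b.getD (i % lb) 0)

-- ===== PRECONDITION & SPEC =====
def Spec_skalarProd (a : List Int) (b : List Int) (out : List Int) : Prop := out = skalarProd_alt a b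
instance (a : List Int) (b : List Int) (out : List Int) : Decidable (Spec_skalarProd a b out) := by unfold Spec_skalarProd; infer_instance

-- ===== CLAIM (what is proved, stated in full; the proofs are below) =====
def Claim_equal_skalarProd : Prop := ∀ (a : List Int) (b : List Int), Dom_skalarProd a b → Spec_skalarProd a b (skalarProd a b)

-- ===== LEMMAS AND PROOFS =====

-- A's index loop on equal-length lists, written as a range map.
theorem skalarProd_A_eq_case (a b : List Int) :
    (PySem.List.pyRange 0 (a.length : Int) 1).foldl
      (fun r i => r ++ [PySem.List.pyGetD a i 0 * PySem.List.pyGetD b i 0]) []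
      = (List.range a.length).map (fun i => a.getD i 0 * b.getD i 0) := by
  rw [PySem.List.foldl_append_singleton_eq_map]
  apply List.ext_getElem
  · simp [PySem.List.length_pyRange_one]
  · intro i h1 h2
    have hi : i < a.length := by
      simpa [PySem.List.length_pyRange_one] using h1
    simp [PySem.List.getElem_pyRange_one, PySem.List.pyGetD_natCast]

-- A's 'scalar times list' loop, as a map.
theorem skalarProd_A_left (x : Int) (b : List Int) :
    b.foldl (fun r i => r ++ [x * i]) [] = b.map (fun i => x * i) := by
  rw [PySem.List.foldl_append_singleton_eq_map]; simp

theorem skalarProd_A_right (y : Int) (a : List Int) :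
    a.foldl (fun r i => r ++ [i * y]) [] = a.map (fun i => i * y) := by
  rw [PySem.List.foldl_append_singleton_eq_map]; simp

-- ===== VERDICT (by name: the statement is the Claim_ definition above) =====
theorem skalarProd_spec : Claim_equal_skalarProd := by
  intro a b _
  unfold Spec_skalarProd skalarProd skalarProd_alt
  by_cases heq : a.length = b.length
  · rw [if_pos heq, skalarProd_A_eq_case]
    by_cases h0 : a.length = 0
    · have hb0 : b.length = 0 := heq ▸ h0
      simp [h0, hb0]
    · have hb0 : b.length ≠ 0 := heq ▸ h0
      rw [if_neg (by simp [hb0, heq])]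
      have hm : max a.length b.length = a.length := by omega
      rw [hm]
      apply List.map_congr_left
      intro i hi
      have hi' : i < a.length := List.mem_range.mp hi
      rw [Nat.mod_eq_of_lt hi', Nat.mod_eq_of_lt (show i < b.length by omega)]
  · rw [if_neg heq]
    by_cases ha1 : a.length = 1
    · obtain ⟨x, rfl⟩ : ∃ x, a = [x] := by
        match a, ha1 with | [x], _ => exact ⟨x, rfl⟩
      rw [if_pos ha1, skalarProd_A_left]
      by_cases hb0 : b.length = 0
      · simp [List.eq_nil_of_length_eq_zero hb0]
      · rw [if_neg (by simp only [List.length_cons, List.length_nil]; omega)]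
        have hm : max ([x] : List Int).length b.length = b.length := by
          simp at heq ⊢; omega
        rw [hm]
        apply List.ext_getElem
        · simp
        · intro i h1 h2
          have hi : i < b.length := by simpa using h2
          simp [Nat.mod_eq_of_lt hi, Nat.mod_one, PySem.List.pyGetD, List.getD, hi]
    · by_cases hb1 : b.length = 1
      · obtain ⟨y, rfl⟩ : ∃ y, b = [y] := by
          match b, hb1 with | [y], _ => exact ⟨y, rfl⟩
        rw [if_neg ha1, if_pos hb1, skalarProd_A_right]
        by_cases ha0 : a.length = 0
        · simp [List.eq_nil_of_length_eq_zero ha0]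
        · rw [if_neg (by simp only [List.length_cons, List.length_nil]; omega)]
          have hm : max a.length ([y] : List Int).length = a.length := by
            simp at heq ⊢; omega
          rw [hm]
          apply List.ext_getElem
          · simp
          · intro i h1 h2
            have hi : i < a.length := by simpa using h2
            simp [Nat.mod_eq_of_lt hi, Nat.mod_one, PySem.List.pyGetD, List.getD, hi]
      · rw [if_neg ha1, if_neg hb1, if_pos (by tauto)]
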